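-- pv_equiv track=rewrite | github.com/jmforsythe/Advent-Of-Code-2022 | 14.py | board_to_grid
-- ===== SOURCE A (Python) =====
-- def board_to_grid(board):
--     # Must include (500, 0)
--     xMin = min(500, min(key[0] for key in board))
--     xMax = max(500, max(key[0] for key in board))
--     yMin = min(0, min(key[1] for key in board))
--     yMax = max(0, max(key[1] for key in board))
--
--     grid = [["." for column in range(int(xMin), int(xMax)+1)] for row in range(int(yMin), int(yMax)+1)]
--     yOffset = yMin
--     xOffset = xMin
--     for key in board:
--         grid[key[1]-yOffset][key[0]-xOffset] = board[key]
--     return grid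
-- ===== SOURCE B (Python) =====
-- def board_to_grid(board):
--     # One pass maintaining running bounds (seeded so (500, 0) is included),
--     # then gather each cell straight from the dict with a '.' default.
--     xMin = xMax = 500
--     yMin = yMax = 0
--     for x, y in board:
--         if x < xMin:
--             xMin = x
--         if x > xMax:
--             xMax = x
--         if y < yMin:
--             yMin = y
--         if y > yMax:
--             yMax = y
--     return [[board.get((x, y), ".") for x in range(xMin, xMax + 1)]
--             for y in range(yMin, yMax + 1)]
-- ===== Notes on version B (the rewrite author's own statement) =====
-- stated objective: idiomatic
-- what changed: Replaces A's four min/max generator passes plus a fill-with-dots grid and a second scatter pass over the dict keys by one running-bounds pass over the keys followed by a single gather comprehension that looks each cell up in the dict with a '.' default.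
import Mathlib
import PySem

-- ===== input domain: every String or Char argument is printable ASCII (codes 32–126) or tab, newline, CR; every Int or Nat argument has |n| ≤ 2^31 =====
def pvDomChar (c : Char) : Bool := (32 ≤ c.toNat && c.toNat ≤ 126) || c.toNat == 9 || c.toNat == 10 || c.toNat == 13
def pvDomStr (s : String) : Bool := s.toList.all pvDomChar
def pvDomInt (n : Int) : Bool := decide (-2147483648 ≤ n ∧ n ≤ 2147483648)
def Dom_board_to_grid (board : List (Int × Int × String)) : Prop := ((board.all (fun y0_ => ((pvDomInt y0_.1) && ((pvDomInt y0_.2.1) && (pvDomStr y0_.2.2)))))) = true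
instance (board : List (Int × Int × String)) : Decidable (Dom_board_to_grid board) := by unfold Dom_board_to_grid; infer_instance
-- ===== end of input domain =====

-- B replaces A's four min/max passes + fill-with-dots grid + scatter pass by one
-- running-bounds pass over the keys and a single gather comprehension; idiomatic, not faster.

-- first-match lookup in the association list (Python dict lookup); default "." when absent
def pvGet (board : List (Int × Int × String)) (x y : Int) : String :=
  match board.find? (fun e => e.1 == x && e.2.1 == y) with
  | some e => e.2.2
  | none => "."

-- grid[i][j] = v  (indices are in range whenever A executes this assignment)
def pvSet2 (g : List (List String)) (i j : Nat) (v : String) : List (List String) :=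
  g.set i ((g.getD i []).set j v)

-- ===== PORT A =====
-- the [] case is where Python's min() raises ValueError; excluded by Pre_.
-- grid indices key[1]-yOffset / key[0]-xOffset are ≥ 0 (yMin/xMin are minima), so .toNat is exact.
def board_to_grid (board : List (Int × Int × String)) : List (List String) :=
  match board with
  | [] => []
  | (x0, y0, _) :: rest =>
    let xMin := min 500 ((rest.map (fun e => e.1)).foldl min x0)
    let xMax := max 500 ((rest.map (fun e => e.1)).foldl max x0)
    let yMin := min 0 ((rest.map (fun e => e.2.1)).foldl min y0)
    let yMax := max 0 ((rest.map (fun e => e.2.1)).foldl max y0)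
    let grid := (PySem.List.pyRange yMin (yMax + 1) 1).map
      (fun _row => (PySem.List.pyRange xMin (xMax + 1) 1).map (fun _col => "."))
    board.foldl
      (fun g e => pvSet2 g (e.2.1 - yMin).toNat (e.1 - xMin).toNat (pvGet board e.1 e.2.1))
      grid

-- ===== PORT B =====
-- Source B's running-bounds loop: one fold carrying (xMin, xMax, yMin, yMax), seeded at (500, 500, 0, 0)
def pvBounds (board : List (Int × Int × String)) : Int × Int × Int × Int :=
  board.foldl
    (fun m e =>
      (if e.1 < m.1 then e.1 else m.1,
       if e.1 > m.2.1 then e.1 else m.2.1,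
       if e.2.1 < m.2.2.1 then e.2.1 else m.2.2.1,
       if e.2.1 > m.2.2.2 then e.2.1 else m.2.2.2))
    (500, 500, 0, 0)

def board_to_grid_alt (board : List (Int × Int × String)) : List (List String) :=
  let b := pvBounds board
  (PySem.List.pyRange b.2.2.1 (b.2.2.2 + 1) 1).map
    (fun y => (PySem.List.pyRange b.1 (b.2.1 + 1) 1).map (fun x => pvGet board x y))

-- ===== PRECONDITION & SPEC =====
-- Pre_ excludes only the empty dict, on which A raises ValueError (min of an empty sequence).
def Pre_board_to_grid (board : List (Int × Int × String)) : Prop := board ≠ []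
instance (board : List (Int × Int × String)) : Decidable (Pre_board_to_grid board) := by unfold Pre_board_to_grid; infer_instance
def pvWitness_board_to_grid : (List (Int × Int × String)) := [(500, 1, "#")]
def Spec_board_to_grid (board : List (Int × Int × String)) (out : List (List String)) : Prop := out = board_to_grid_alt board
instance (board : List (Int × Int × String)) (out : List (List String)) : Decidable (Spec_board_to_grid board out) := by unfold Spec_board_to_grid; infer_instance

-- ===== CLAIM (what is proved, stated in full; the proofs are below) =====
def Claim_equal_board_to_grid : Prop := ∀ (board : List (Int × Int × String)), Dom_board_to_grid board → Pre_board_to_grid board → Spec_board_to_grid board (board_to_grid board)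

-- ===== LEMMAS AND PROOFS =====

theorem foldl_min_le : ∀ (l : List Int) (a x : Int), (x = a ∨ x ∈ l) → l.foldl min a ≤ x := by
  intro l
  induction l with
  | nil =>
    intro a x h
    rcases h with rfl | h
    · simp
    · cases h
  | cons b t ih =>
    intro a x h
    simp only [List.foldl_cons]
    have step : t.foldl min (min a b) ≤ min a b := ih _ _ (Or.inl rfl)
    rcases h with rfl | h
    · exact le_trans step (min_le_left x b)
    · rcases List.mem_cons.mp h with rfl | h
      · exact le_trans step (min_le_right a x)
      · exact ih _ _ (Or.inr h)

theorem le_foldl_max : ∀ (l : List Int) (a x : Int), (x = a ∨ x ∈ l) → x ≤ l.foldl max a := by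
  intro l
  induction l with
  | nil =>
    intro a x h
    rcases h with rfl | h
    · simp
    · cases h
  | cons b t ih =>
    intro a x h
    simp only [List.foldl_cons]
    have step : max a b ≤ t.foldl max (max a b) := ih _ _ (Or.inl rfl)
    rcases h with rfl | h
    · exact le_trans (le_max_left x b) step
    · rcases List.mem_cons.mp h with rfl | h
      · exact le_trans (le_max_right a x) step
      · exact ih _ _ (Or.inr h)

-- the 4-tuple running-bounds fold is componentwise four min/max folds
theorem pvBounds_fold_eq : ∀ (l : List (Int × Int × String)) (m : Int × Int × Int × Int),
    l.foldl
      (fun m e =>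
        (if e.1 < m.1 then e.1 else m.1,
         if e.1 > m.2.1 then e.1 else m.2.1,
         if e.2.1 < m.2.2.1 then e.2.1 else m.2.2.1,
         if e.2.1 > m.2.2.2 then e.2.1 else m.2.2.2)) m
    = ((l.map (fun e => e.1)).foldl min m.1,
       (l.map (fun e => e.1)).foldl max m.2.1,
       (l.map (fun e => e.2.1)).foldl min m.2.2.1,
       (l.map (fun e => e.2.1)).foldl max m.2.2.2) := by
  intro l
  induction l with
  | nil => intro m; rfl
  | cons e t ih =>
    intro m
    have h1 : (if e.1 < m.1 then e.1 else m.1) = min m.1 e.1 := by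
      rw [min_def]; split_ifs <;> omega
    have h2 : (if e.1 > m.2.1 then e.1 else m.2.1) = max m.2.1 e.1 := by
      rw [max_def]; split_ifs <;> omega
    have h3 : (if e.2.1 < m.2.2.1 then e.2.1 else m.2.2.1) = min m.2.2.1 e.2.1 := by
      rw [min_def]; split_ifs <;> omega
    have h4 : (if e.2.1 > m.2.2.2 then e.2.1 else m.2.2.2) = max m.2.2.2 e.2.1 := by
      rw [max_def]; split_ifs <;> omega
    simp only [List.foldl_cons, List.map_cons, h1, h2, h3, h4]
    exact ih (min m.1 e.1, max m.2.1 e.1, min m.2.2.1 e.2.1, max m.2.2.2 e.2.1)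

theorem foldl_min_comm : ∀ (l : List Int) (a b : Int),
    l.foldl min (min a b) = min a (l.foldl min b) := by
  intro l
  induction l with
  | nil => intro a b; rfl
  | cons c t ih =>
    intro a b
    simp only [List.foldl_cons, min_assoc]
    exact ih a (min b c)

theorem foldl_max_comm : ∀ (l : List Int) (a b : Int),
    l.foldl max (max a b) = max a (l.foldl max b) := by
  intro l
  induction l with
  | nil => intro a b; rfl
  | cons c t ih =>
    intro a b
    simp only [List.foldl_cons, max_assoc]
    exact ih a (max b c)

def pvCell (g : List (List String)) (i j : Nat) : String :=
  ((g[i]?.getD [])[j]?.getD ".")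

theorem pvSet2_shape (g : List (List String)) (i j : Nat) (v : String) :
    (pvSet2 g i j v).map List.length = g.map List.length := by
  unfold pvSet2
  by_cases hi : i < g.length
  · rw [List.map_set]
    have : (g.getD i []) = g[i] := List.getD_eq_getElem g [] hi
    rw [this]
    have hi' : i < (g.map List.length).length := by simpa using hi
    have h2 : (g[i].set j v).length = g[i].length := by simp
    rw [h2, show g[i].length = (g.map List.length)[i] from (List.getElem_map _).symm,
      List.set_getElem_self]
  · rw [List.set_eq_of_length_le (by omega)]

theorem pvCell_set2_same (g : List (List String)) (i j : Nat) (v : String)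
    (hi : i < g.length) (hj : j < (g.getD i []).length) :
    pvCell (pvSet2 g i j v) i j = v := by
  unfold pvCell pvSet2
  rw [List.getElem?_set_self (by simpa using hi)]
  simp only [Option.getD_some]
  rw [List.getElem?_set_self hj]
  rfl

theorem pvCell_set2_ne (g : List (List String)) (i' j' i j : Nat) (v : String)
    (h : ¬ (i' = i ∧ j' = j)) :
    pvCell (pvSet2 g i' j' v) i j = pvCell g i j := by
  unfold pvCell pvSet2
  by_cases hii : i' = i
  · subst hii
    have hjj : j' ≠ j := fun hj => h ⟨rfl, hj⟩
    by_cases hlen : i' < g.length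
    · rw [List.getElem?_set_self (by simpa using hlen)]
      simp only [Option.getD_some]
      rw [List.getElem?_set_ne hjj]
      rw [List.getD_eq_getElem g [] hlen]
      simp [hlen]
    · rw [List.set_eq_of_length_le (by omega)]
  · rw [List.getElem?_set_ne hii]

theorem scatter_cell (b₀ : List (Int × Int × String)) (xm ym : Int) (H W : Nat)
    (bs : List (Int × Int × String)) :
    ∀ (g : List (List String)),
    g.length = H → (∀ r ∈ g, r.length = W) →
    (∀ e ∈ bs, xm ≤ e.1 ∧ ym ≤ e.2.1 ∧ (e.2.1 - ym).toNat < H ∧ (e.1 - xm).toNat < W) →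
    ∀ i j : Nat,
    pvCell (bs.foldl (fun g e => pvSet2 g (e.2.1 - ym).toNat (e.1 - xm).toNat (pvGet b₀ e.1 e.2.1)) g) i j =
      if (∃ e ∈ bs, e.1 = xm + (j : Int) ∧ e.2.1 = ym + (i : Int)) then pvGet b₀ (xm + j) (ym + i) else pvCell g i j := by
  induction bs with
  | nil => intro g _ _ _ i j; simp
  | cons e bs ih =>
    intro g hlen hrow hb i j
    obtain ⟨hxm, hym, hiH, hjW⟩ := hb e (List.mem_cons_self)
    simp only [List.foldl_cons]
    have hshape := pvSet2_shape g (e.2.1 - ym).toNat (e.1 - xm).toNat (pvGet b₀ e.1 e.2.1)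
    have hlen' : (pvSet2 g (e.2.1 - ym).toNat (e.1 - xm).toNat (pvGet b₀ e.1 e.2.1)).length = H := by
      have h := congrArg List.length hshape
      simp only [List.length_map] at h
      exact h.trans hlen
    have hrow' : ∀ r ∈ pvSet2 g (e.2.1 - ym).toNat (e.1 - xm).toNat (pvGet b₀ e.1 e.2.1), r.length = W := by
      intro r hr
      have hmem : r.length ∈ g.map List.length := by
        rw [← hshape]; exact List.mem_map_of_mem hr
      obtain ⟨r', hr', hlr⟩ := List.mem_map.mp hmem
      rw [← hlr]; exact hrow r' hr'
    rw [ih _ hlen' hrow' (fun x hx => hb x (List.mem_cons_of_mem _ hx)) i j]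
    by_cases hm : e.1 = xm + (j : Int) ∧ e.2.1 = ym + (i : Int)
    · obtain ⟨hm1, hm2⟩ := hm
      have hie : (e.2.1 - ym).toNat = i := by omega
      have hje : (e.1 - xm).toNat = j := by omega
      have hig : i < g.length := by omega
      have hcell : pvCell (pvSet2 g (e.2.1 - ym).toNat (e.1 - xm).toNat (pvGet b₀ e.1 e.2.1)) i j
          = pvGet b₀ (xm + j) (ym + i) := by
        rw [hie, hje, pvCell_set2_same g i j _ hig ?_]
        · rw [hm1, hm2]
        · rw [List.getD_eq_getElem g [] hig]
          have := hrow g[i] (List.getElem_mem hig)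
          omega
      have hex : ∃ x ∈ e :: bs, x.1 = xm + (j : Int) ∧ x.2.1 = ym + (i : Int) :=
        ⟨e, List.mem_cons_self, hm1, hm2⟩
      by_cases h2 : ∃ x ∈ bs, x.1 = xm + (j : Int) ∧ x.2.1 = ym + (i : Int)
      · rw [if_pos h2, if_pos hex]
      · rw [if_neg h2, if_pos hex, hcell]
    · have hne : ¬ ((e.2.1 - ym).toNat = i ∧ (e.1 - xm).toNat = j) := by
        rintro ⟨h1, h2⟩; exact hm ⟨by omega, by omega⟩
      rw [pvCell_set2_ne g _ _ i j _ hne]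
      have hiff : (∃ x ∈ e :: bs, x.1 = xm + (j : Int) ∧ x.2.1 = ym + (i : Int)) ↔
          (∃ x ∈ bs, x.1 = xm + (j : Int) ∧ x.2.1 = ym + (i : Int)) := by
        constructor
        · rintro ⟨x, hx, hp⟩
          rcases List.mem_cons.mp hx with rfl | hx
          · exact absurd hp hm
          · exact ⟨x, hx, hp⟩
        · rintro ⟨x, hx, hp⟩
          exact ⟨x, List.mem_cons_of_mem _ hx, hp⟩
      by_cases h2 : ∃ x ∈ bs, x.1 = xm + (j : Int) ∧ x.2.1 = ym + (i : Int)
      · rw [if_pos h2, if_pos (hiff.mpr h2)]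
      · rw [if_neg h2, if_neg (fun hx => h2 (hiff.mp hx))]

theorem scatter_shape (b₀ : List (Int × Int × String)) (xm ym : Int)
    (bs : List (Int × Int × String)) :
    ∀ g : List (List String),
    ((bs.foldl (fun g e => pvSet2 g (e.2.1 - ym).toNat (e.1 - xm).toNat (pvGet b₀ e.1 e.2.1)) g)).map List.length = g.map List.length := by
  induction bs with
  | nil => intro g; rfl
  | cons e bs ih =>
    intro g
    simp only [List.foldl_cons]
    rw [ih _, pvSet2_shape]

theorem scatter_eq_gather (board : List (Int × Int × String)) (xm xM ym yM : Int)
    (hb : ∀ e ∈ board, xm ≤ e.1 ∧ e.1 ≤ xM ∧ ym ≤ e.2.1 ∧ e.2.1 ≤ yM) :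
    board.foldl
      (fun g e => pvSet2 g (e.2.1 - ym).toNat (e.1 - xm).toNat (pvGet board e.1 e.2.1))
      ((PySem.List.pyRange ym (yM + 1) 1).map
        (fun _row => (PySem.List.pyRange xm (xM + 1) 1).map (fun _col => ".")))
    = (PySem.List.pyRange ym (yM + 1) 1).map
        (fun y => (PySem.List.pyRange xm (xM + 1) 1).map (fun x => pvGet board x y)) := by
  set H := (yM + 1 - ym).toNat with hH
  set W := (xM + 1 - xm).toNat with hW
  set dots := (PySem.List.pyRange xm (xM + 1) 1).map (fun _col => ".") with hdots
  set g0 := (PySem.List.pyRange ym (yM + 1) 1).map (fun _row => dots) with hg0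
  set A := board.foldl
      (fun g e => pvSet2 g (e.2.1 - ym).toNat (e.1 - xm).toNat (pvGet board e.1 e.2.1)) g0 with hA
  have hdotslen : dots.length = W := by
    rw [hdots, List.length_map, PySem.List.length_pyRange_one]
  have hg0len : g0.length = H := by
    rw [hg0, List.length_map, PySem.List.length_pyRange_one]
  have hg0row : ∀ r ∈ g0, r.length = W := by
    intro r hr
    obtain ⟨y, _, rfl⟩ := List.mem_map.mp hr
    exact hdotslen
  have hshape : A.map List.length = g0.map List.length := scatter_shape board xm ym board g0
  have hAlen : A.length = H := by
    have h := congrArg List.length hshape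
    simp only [List.length_map] at h
    exact h.trans hg0len
  have hArow : ∀ (i : Nat) (h : i < A.length), A[i].length = W := by
    intro i h
    have h1 : (A.map List.length)[i]? = (g0.map List.length)[i]? := by rw [hshape]
    rw [List.getElem?_map, List.getElem?_map, List.getElem?_eq_getElem h,
      List.getElem?_eq_getElem (by omega : i < g0.length)] at h1
    simp only [Option.map_some, Option.some.injEq] at h1
    have h2 := hg0row g0[i] (List.getElem_mem _)
    omega
  have hbnd : ∀ e ∈ board, xm ≤ e.1 ∧ ym ≤ e.2.1 ∧ (e.2.1 - ym).toNat < H ∧ (e.1 - xm).toNat < W := by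
    intro e he
    obtain ⟨h1, h2, h3, h4⟩ := hb e he
    exact ⟨h1, h3, by omega, by omega⟩
  have hcellA : ∀ i j : Nat, pvCell A i j =
      if (∃ e ∈ board, e.1 = xm + (j : Int) ∧ e.2.1 = ym + (i : Int)) then
        pvGet board (xm + j) (ym + i) else pvCell g0 i j :=
    scatter_cell board xm ym H W board g0 hg0len hg0row hbnd
  apply List.ext_getElem?
  intro i
  by_cases hi : i < H
  · have hiA : i < A.length := by omega
    rw [List.getElem?_eq_getElem hiA, List.getElem?_map,
      PySem.List.getElem?_pyRange_one, if_pos (show i < (yM + 1 - ym).toNat by omega)]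
    simp only [Option.map_some]
    congr 1
    have hrowlen : A[i].length = W := hArow i hiA
    apply List.ext_getElem?
    intro j
    by_cases hj : j < W
    · have hjA : j < A[i].length := by rw [hrowlen]; exact hj
      rw [List.getElem?_eq_getElem hjA, List.getElem?_map,
        PySem.List.getElem?_pyRange_one, if_pos (show j < (xM + 1 - xm).toNat by omega)]
      simp only [Option.map_some]
      congr 1
      have hcell : pvCell A i j = A[i][j] := by
        unfold pvCell
        rw [List.getElem?_eq_getElem hiA]
        simp only [Option.getD_some]
        rw [List.getElem?_eq_getElem hjA]
        rfl
      rw [← hcell, hcellA i j]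
      by_cases hex : ∃ e ∈ board, e.1 = xm + (j : Int) ∧ e.2.1 = ym + (i : Int)
      · rw [if_pos hex]
      · rw [if_neg hex]
        have hg0cell : pvCell g0 i j = "." := by
          unfold pvCell
          rw [hg0, List.getElem?_map, PySem.List.getElem?_pyRange_one,
            if_pos (show i < (yM + 1 - ym).toNat by omega)]
          simp only [Option.map_some, Option.getD_some]
          rw [hdots, List.getElem?_map, PySem.List.getElem?_pyRange_one,
            if_pos (show j < (xM + 1 - xm).toNat by omega)]
          simp only [Option.map_some, Option.getD_some]
        have hget : pvGet board (xm + (j : Int)) (ym + (i : Int)) = "." := by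
          unfold pvGet
          rw [List.find?_eq_none.mpr ?_]
          intro e he hp
          simp only [Bool.and_eq_true, beq_iff_eq] at hp
          exact hex ⟨e, he, hp.1, hp.2⟩
        rw [hg0cell, hget]
    · rw [List.getElem?_eq_none (by omega), List.getElem?_eq_none (by
        rw [List.length_map, PySem.List.length_pyRange_one]; omega)]
  · rw [List.getElem?_eq_none (by omega), List.getElem?_eq_none (by
      rw [List.length_map, PySem.List.length_pyRange_one]; omega)]

-- B's running bounds coincide with A's min/max bounds on a nonempty board
theorem pvBounds_eq (x0 y0 : Int) (v0 : String) (rest : List (Int × Int × String)) :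
    pvBounds ((x0, y0, v0) :: rest)
    = (min 500 ((rest.map (fun e => e.1)).foldl min x0),
       max 500 ((rest.map (fun e => e.1)).foldl max x0),
       min 0 ((rest.map (fun e => e.2.1)).foldl min y0),
       max 0 ((rest.map (fun e => e.2.1)).foldl max y0)) := by
  unfold pvBounds
  rw [pvBounds_fold_eq]
  simp only [List.map_cons, List.foldl_cons]
  have h1 : min (500 : Int) x0 = min 500 x0 := rfl
  congr 1
  · show (rest.map (fun e => e.1)).foldl min (min 500 x0) = _
    exact foldl_min_comm _ 500 x0
  congr 1
  · show (rest.map (fun e => e.1)).foldl max (max 500 x0) = _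
    exact foldl_max_comm _ 500 x0
  congr 1
  · show (rest.map (fun e => e.2.1)).foldl min (min 0 y0) = _
    exact foldl_min_comm _ 0 y0
  · show (rest.map (fun e => e.2.1)).foldl max (max 0 y0) = _
    exact foldl_max_comm _ 0 y0

-- ===== VERDICT (by name: the statement is the Claim_ definition above) =====
theorem board_to_grid_spec : Claim_equal_board_to_grid := by
  intro board hdom hpre
  unfold Spec_board_to_grid
  match board with
  | [] => exact absurd rfl hpre
  | (x0, y0, v0) :: rest =>
    simp only [board_to_grid, board_to_grid_alt, pvBounds_eq]
    apply scatter_eq_gather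
    intro e he
    refine ⟨?_, ?_, ?_, ?_⟩
    · refine le_trans (min_le_right _ _) (foldl_min_le _ _ _ ?_)
      rcases List.mem_cons.mp he with rfl | he
      · exact Or.inl rfl
      · exact Or.inr (List.mem_map_of_mem he)
    · refine le_trans (le_foldl_max _ _ _ ?_) (le_max_right _ _)
      rcases List.mem_cons.mp he with rfl | he
      · exact Or.inl rfl
      · exact Or.inr (List.mem_map_of_mem he)
    · refine le_trans (min_le_right _ _) (foldl_min_le _ _ _ ?_)
      rcases List.mem_cons.mp he with rfl | he
      · exact Or.inl rfl
      · exact Or.inr (List.mem_map_of_mem he)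
    · refine le_trans (le_foldl_max _ _ _ ?_) (le_max_right _ _)
      rcases List.mem_cons.mp he with rfl | he
      · exact Or.inl rfl
      · exact Or.inr (List.mem_map_of_mem he)
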